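-- pv_equiv track=rewrite | github.com/Maiiialen/Task-scheduling-algorithms | IA_problem/ia.py | znajdzNajlepszegoOsobnika
-- ===== SOURCE A (Python) =====
-- import math
--
-- def calculate_Cmax(zad):
--     if len(zad) == 0:
--         return math.inf
--
--     S = []
--     C = []
--     Szad = []
--     Czad = []
--
--     Szad.append(0)
--     Czad.append(zad[0][0])
--
--     for i in range(0, len(zad)):
--         for j in range(0, len(zad[i])-1):
--             if i == 0 and j != 0:
--                 Szad.append(Czad[j-1])
--                 Czad.append(Szad[j] + zad[i][j])
--             elif i != 0:
--                 if j == 0: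
--                     Szad.append(C[i-1][0])
--                     Czad.append(Szad[0] + zad[i][0])
--                 else:
--                     Szad.append(max(Czad[j-1], C[i-1][j]))
--                     Czad.append(Szad[j] + zad[i][j])
--
--         S.append(Szad.copy())
--         C.append(Czad.copy())
--         Szad.clear()
--         Czad.clear()
--
--     return C[-1][-1]
--
-- def znajdzNajlepszegoOsobnika(wyspy):
--     Cmin = math.inf
--     najlepszyOsobnik = None
--
--     for wyspa in wyspy:
--         for osobnik in wyspa:
--             C = calculate_Cmax(osobnik)
--             if C < Cmin:
--                 Cmin = C
--                 najlepszyOsobnik = osobnik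
--
--     return najlepszyOsobnik
-- ===== SOURCE B (Python) =====
-- import math
--
-- def _cmax(zad):
--     # flow-shop makespan as a top-down memoized recursion:
--     # C(i,j) = max(C(i-1,j), C(i,j-1)) + zad[i][j], single-neighbour boundaries;
--     # answer at (last row, last-but-one column), matching the original's
--     # dropped-last-column convention; inf for an empty task list.
--     if not zad:
--         return math.inf
--     memo = {}
--     def C(i, j):
--         if (i, j) not in memo:
--             if i == 0 and j == 0:
--                 memo[(i, j)] = zad[0][0]
--             elif i == 0:
--                 memo[(i, j)] = C(0, j - 1) + zad[0][j]
--             elif j == 0: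
--                 memo[(i, j)] = C(i - 1, 0) + zad[i][0]
--             else:
--                 memo[(i, j)] = max(C(i - 1, j), C(i, j - 1)) + zad[i][j]
--         return memo[(i, j)]
--     m = len(zad[-1])
--     return C(len(zad) - 1, m - 2 if m >= 2 else 0)
--
-- def znajdzNajlepszegoOsobnika(wyspy):
--     Cmin = math.inf
--     najlepszyOsobnik = None
--     for wyspa in wyspy:
--         for osobnik in wyspa:
--             c = _cmax(osobnik)
--             if c < Cmin:
--                 Cmin = c
--                 najlepszyOsobnik = osobnik
--     return najlepszyOsobnik
-- ===== Notes on version B (the rewrite author's own statement) =====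
-- stated objective: alternative
-- what changed: calculate_Cmax's table of start/completion rows (S, C, Szad, Czad with per-row copy/clear and a three-way branch) is replaced by the direct flow-shop recurrence C(i,j) = max(C(i-1,j), C(i,j-1)) + zad[i][j] computed as a top-down memoized recursion that evaluates only the cells the answer needs; the outer first-strict-minimum scan over islands is unchanged.
-- outside the precondition, e.g. on znajdzNajlepszegoOsobnika([[[[1, 2], [3]]]]): A raises IndexError, B returns [[1, 2], [3]]; on znajdzNajlepszegoOsobnika([[[[1, 2], [1, 2, 3]]]]): A raises IndexError, B returns [[1, 2], [1, 2, 3]]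
import Mathlib
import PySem

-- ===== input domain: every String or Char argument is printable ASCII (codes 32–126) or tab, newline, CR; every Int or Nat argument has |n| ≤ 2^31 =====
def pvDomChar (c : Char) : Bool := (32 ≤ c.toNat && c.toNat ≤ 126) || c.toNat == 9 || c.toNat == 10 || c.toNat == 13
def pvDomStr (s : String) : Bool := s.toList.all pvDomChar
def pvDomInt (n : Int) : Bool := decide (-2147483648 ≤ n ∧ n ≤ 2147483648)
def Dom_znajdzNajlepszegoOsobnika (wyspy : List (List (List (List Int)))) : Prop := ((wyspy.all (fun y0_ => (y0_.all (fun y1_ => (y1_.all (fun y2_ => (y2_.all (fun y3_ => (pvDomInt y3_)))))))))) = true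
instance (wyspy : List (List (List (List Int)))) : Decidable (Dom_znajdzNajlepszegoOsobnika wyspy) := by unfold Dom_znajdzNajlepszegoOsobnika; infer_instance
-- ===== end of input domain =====

-- B re-implements the inner flow-shop makespan (calculate_Cmax) as a direct recurrence
-- C(i,j), memoized top-down in Source B and ported here as the same pure recursion; the
-- outer first-strict-minimum scan is unchanged.  A's math.inf (empty task list) is
-- `none : Option Int` in both ports; it never escapes, since `inf < Cmin` is false.

-- ===== PORT A =====
-- body of A's inner `for j in range(0, len(zad[i])-1)` loop (state = (Szad, Czad))
def pvInnerA (C : List (List Int)) (row : List Int) (i : Int)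
    (sc : List Int × List Int) (j : Int) : List Int × List Int :=
  if i = 0 then
    if j ≠ 0 then
      let Szad' := sc.1 ++ [PySem.List.pyGetD sc.2 (j-1) 0]
      (Szad', sc.2 ++ [PySem.List.pyGetD Szad' j 0 + PySem.List.pyGetD row j 0])
    else sc
  else
    if j = 0 then
      let Szad' := sc.1 ++ [PySem.List.pyGetD (PySem.List.pyGetD C (i-1) []) 0 0]
      (Szad', sc.2 ++ [PySem.List.pyGetD Szad' 0 0 + PySem.List.pyGetD row 0 0])
    else
      let Szad' := sc.1 ++ [max (PySem.List.pyGetD sc.2 (j-1) 0) (PySem.List.pyGetD (PySem.List.pyGetD C (i-1) []) j 0)]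
      (Szad', sc.2 ++ [PySem.List.pyGetD Szad' j 0 + PySem.List.pyGetD row j 0])

-- body of A's outer `for i in range(0, len(zad))` loop (state = (S, C, Szad, Czad);
-- Szad/Czad are cleared at the end of each iteration, as in the Python)
def pvOuterA (zad : List (List Int))
    (st : List (List Int) × List (List Int) × List Int × List Int) (i : Int) :
    List (List Int) × List (List Int) × List Int × List Int :=
  let row := PySem.List.pyGetD zad i []
  let inner := (PySem.List.pyRange 0 ((row.length : Int) - 1) 1).foldl
      (pvInnerA st.2.1 row i) (st.2.2.1, st.2.2.2)
  (st.1 ++ [inner.1], st.2.1 ++ [inner.2], ([] : List Int), ([] : List Int))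

-- calculate_Cmax; `none` = math.inf (empty zad) or IndexError (excluded by Pre_,
-- where none of the pyGetD defaults below is ever the value actually read)
def pvCalcA (zad : List (List Int)) : Option Int :=
  if zad.length = 0 then none
  else
    (PySem.List.pyGet?
      ((PySem.List.pyRange 0 (zad.length : Int) 1).foldl (pvOuterA zad)
        ([], [], [0], [PySem.List.pyGetD (PySem.List.pyGetD zad 0 []) 0 0])).2.1 (-1)).bind
      (fun r => PySem.List.pyGet? r (-1))

def znajdzNajlepszegoOsobnika (wyspy : List (List (List (List Int)))) : Option (List (List Int)) :=
  (wyspy.foldl (fun st wyspa =>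
    wyspa.foldl (fun (st : Option Int × Option (List (List Int))) osobnik =>
      match pvCalcA osobnik with
      | none => st                -- C = inf: never < Cmin
      | some c =>
        match st.1 with
        | none => (some c, some osobnik)      -- Cmin is still inf
        | some cm => if c < cm then (some c, some osobnik) else st) st)
    (none, none)).2

-- ===== PORT B =====
-- Source B's C(i, j); the memo only caches this same recurrence, so it is ported as
-- the pure recursion
def pvCRec (zad : List (List Int)) : Nat → Nat → Int
  | 0, 0 => (zad.getD 0 []).getD 0 0
  | 0, j+1 => pvCRec zad 0 j + (zad.getD 0 []).getD (j+1) 0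
  | i+1, 0 => pvCRec zad i 0 + (zad.getD (i+1) []).getD 0 0
  | i+1, j+1 => max (pvCRec zad i (j+1)) (pvCRec zad (i+1) j) + (zad.getD (i+1) []).getD (j+1) 0
termination_by i j => (i, j)

def pvCalcB (zad : List (List Int)) : Option Int :=
  if zad.length = 0 then none
  else
    some (pvCRec zad (zad.length - 1)
      (if 2 ≤ (zad.getLast?.getD []).length then (zad.getLast?.getD []).length - 2 else 0))

def znajdzNajlepszegoOsobnika_alt (wyspy : List (List (List (List Int)))) : Option (List (List Int)) :=
  (wyspy.foldl (fun st wyspa =>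
    wyspa.foldl (fun (st : Option Int × Option (List (List Int))) osobnik =>
      match pvCalcB osobnik with
      | none => st
      | some c =>
        match st.1 with
        | none => (some c, some osobnik)
        | some cm => if c < cm then (some c, some osobnik) else st) st)
    (none, none)).2

-- ===== PRECONDITION & SPEC =====
-- Pre_ excludes exactly the inputs on which Python A raises IndexError inside
-- calculate_Cmax: an osobnik whose first row is empty, or (with ≥ 2 rows) whose
-- later rows are not all of length ≥ 2 with non-increasing lengths from row 1 on
-- (row 1 itself bounded by max 2 (len row 0)).  On every other input A returns.
def pvChainOK : Nat → List (List Int) → Bool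
  | _, [] => true
  | p, r :: rest => decide (2 ≤ r.length) && decide (r.length - 1 ≤ p) && pvChainOK (r.length - 1) rest

def pvValidZad : List (List Int) → Bool
  | [] => true
  | r0 :: rest => decide (0 < r0.length) && pvChainOK (max 1 (r0.length - 1)) rest

def Pre_znajdzNajlepszegoOsobnika (wyspy : List (List (List (List Int)))) : Prop :=
  ∀ w ∈ wyspy, ∀ o ∈ w, pvValidZad o = true
instance (wyspy : List (List (List (List Int)))) : Decidable (Pre_znajdzNajlepszegoOsobnika wyspy) := by
  unfold Pre_znajdzNajlepszegoOsobnika; infer_instance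

def pvWitness_znajdzNajlepszegoOsobnika : List (List (List (List Int))) :=
  [[[[1, 2], [3, 4]], [[5]]], [[]]]

def Spec_znajdzNajlepszegoOsobnika (wyspy : List (List (List (List Int)))) (out : Option (List (List Int))) : Prop := out = znajdzNajlepszegoOsobnika_alt wyspy
instance (wyspy : List (List (List (List Int)))) (out : Option (List (List Int))) : Decidable (Spec_znajdzNajlepszegoOsobnika wyspy out) := by unfold Spec_znajdzNajlepszegoOsobnika; infer_instance

-- ===== CLAIM (what is proved, stated in full; the proofs are below) =====
def Claim_equal_znajdzNajlepszegoOsobnika : Prop := ∀ (wyspy : List (List (List (List Int)))), Dom_znajdzNajlepszegoOsobnika wyspy → Pre_znajdzNajlepszegoOsobnika wyspy → Spec_znajdzNajlepszegoOsobnika wyspy (znajdzNajlepszegoOsobnika wyspy)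

-- ===== LEMMAS AND PROOFS =====

-- number of Czad-entries A stores for row i of a valid zad
def pvL (zad : List (List Int)) : Nat → Nat
  | 0 => max 1 ((zad.getD 0 []).length - 1)
  | i+1 => (zad.getD (i+1) []).length - 1

-- the Czad list A stores for row i, expressed through B's recurrence
def pvRowVal (zad : List (List Int)) (i : Nat) : List Int :=
  (List.range (pvL zad i)).map (pvCRec zad i)

lemma pv_getD_append (l : List Int) (x : Int) : (l ++ [x]).getD l.length 0 = x := by
  simp

lemma pv_getD_append_lists (l : List (List Int)) (x : List Int) :
    (l ++ [x]).getD l.length [] = x := by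
  simp

lemma pv_getD_range_map (f : Nat → Int) (n k : Nat) (h : k < n) :
    (((List.range n).map f).getD k 0) = f k := by
  rw [List.getD_eq_getElem?_getD]
  simp [List.getElem?_map, List.getElem?_range h]

lemma pv_chain_facts (rest : List (List Int)) :
    ∀ p, pvChainOK p rest = true → ∀ k, k < rest.length →
      2 ≤ (rest.getD k []).length ∧
      (rest.getD k []).length - 1 ≤ (if k = 0 then p else (rest.getD (k-1) []).length - 1) := by
  induction rest with
  | nil => intro p _ k hk; simp at hk
  | cons r rest ih =>
    intro p hok k hk
    simp only [pvChainOK, Bool.and_eq_true, decide_eq_true_eq] at hok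
    obtain ⟨⟨h2, hle⟩, hrest⟩ := hok
    cases k with
    | zero => refine ⟨by simpa using h2, ?_⟩; simp; omega
    | succ k =>
      have hk' : k < rest.length := by simpa using hk
      have := ih (r.length - 1) hrest k hk'
      cases k with
      | zero => simpa using this
      | succ k => simpa using this

-- row 0 of A's table: Czad = B's C(0, ·), for every prefix length t of the j-loop
lemma pv_inner0 (zad C : List (List Int)) (t : Nat) :
    ∃ Sz : List Int,
      (PySem.List.pyRange 0 (t : Int) 1).foldl
        (pvInnerA C (PySem.List.pyGetD zad 0 []) 0)
        ([0], [PySem.List.pyGetD (PySem.List.pyGetD zad 0 []) 0 0])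
      = (Sz, (List.range (max 1 t)).map (pvCRec zad 0)) ∧ Sz.length = max 1 t := by
  induction t with
  | zero =>
    refine ⟨[0], ?_, rfl⟩
    rw [PySem.List.pyRange_one_eq_nil (by norm_num)]
    simp [pvCRec, PySem.List.pyGetD_zero]
  | succ t ih =>
    obtain ⟨Sz, hfold, hlen⟩ := ih
    have hcast : ((t + 1 : Nat) : Int) = (t : Int) + 1 := by push_cast; ring
    rw [hcast, PySem.List.pyRange_one_succ_right (by positivity), List.foldl_append,
      hfold]
    cases t with
    | zero =>
      refine ⟨Sz, ?_, by simpa using hlen⟩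
      simp [pvInnerA, List.foldl]
    | succ s =>
      simp only [List.foldl, pvInnerA]
      have hne : ((s + 1 : Nat) : Int) ≠ 0 := by push_cast; omega
      rw [if_pos hne]
      have hj1 : ((s + 1 : Nat) : Int) - 1 = ((s : Nat) : Int) := by push_cast; ring
      have hmax : max 1 (s + 1) = s + 1 := by omega
      rw [hj1]
      simp only [PySem.List.pyGetD_natCast]
      rw [hmax] at hlen ⊢
      have hget : (((List.range (s+1)).map (pvCRec zad 0)).getD s 0) = pvCRec zad 0 s :=
        pv_getD_range_map _ _ _ (by omega)
      rw [hget]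
      have hsz : (Sz ++ [pvCRec zad 0 s]).getD (s+1) 0 = pvCRec zad 0 s := by
        rw [← hlen]; exact pv_getD_append _ _
      rw [hsz]
      refine ⟨Sz ++ [pvCRec zad 0 s], ?_, by simp [hlen]⟩
      have : pvCRec zad 0 s + (PySem.List.pyGetD zad 0 []).getD (s+1) 0 = pvCRec zad 0 (s+1) := by
        rw [pvCRec]; simp [PySem.List.pyGetD_zero]
      rw [this, max_eq_right (by omega : 1 ≤ s + 1 + 1)]
      simp [List.range_succ]

-- row i+1 of A's table: Czad = B's C(i+1, ·), given the stored previous row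
lemma pv_innerS (zad C : List (List Int)) (i L : Nat)
    (hC : PySem.List.pyGetD C (i : Int) [] = (List.range L).map (pvCRec zad i))
    (hrow : (zad.getD (i+1) []).length - 1 ≤ L) :
    ∀ t, t ≤ (zad.getD (i+1) []).length - 1 →
    ∃ Sz : List Int,
      (PySem.List.pyRange 0 (t : Int) 1).foldl
        (pvInnerA C (PySem.List.pyGetD zad ((i : Int) + 1) []) ((i : Int) + 1))
        ([], [])
      = (Sz, (List.range t).map (pvCRec zad (i+1))) ∧ Sz.length = t := by
  intro t
  induction t with
  | zero =>
    intro _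
    refine ⟨[], ?_, rfl⟩
    rw [PySem.List.pyRange_one_eq_nil (by norm_num)]
    simp
  | succ t ih =>
    intro ht
    obtain ⟨Sz, hfold, hlen⟩ := ih (by omega)
    have hm2 : 2 ≤ (zad.getD (i+1) []).length := by omega
    have hL1 : 1 ≤ L := by omega
    have hcast : ((t + 1 : Nat) : Int) = (t : Int) + 1 := by push_cast; ring
    rw [hcast, PySem.List.pyRange_one_succ_right (by positivity), List.foldl_append,
      hfold]
    have hi0 : ((i : Int) + 1) ≠ 0 := by omega
    have hi1 : ((i : Int) + 1) - 1 = (i : Int) := by ring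
    have hzrow : PySem.List.pyGetD zad ((i : Int) + 1) [] = zad.getD (i+1) [] := by
      have : ((i : Int) + 1) = ((i + 1 : Nat) : Int) := by push_cast; ring
      rw [this, PySem.List.pyGetD_natCast]
    cases t with
    | zero =>
      simp only [List.foldl, pvInnerA, if_neg hi0, Nat.cast_zero, hi1, hC, hzrow]
      have h0 : (((List.range L).map (pvCRec zad i)).getD 0 0) = pvCRec zad i 0 :=
        pv_getD_range_map _ _ _ (by omega)
      simp only [PySem.List.pyGetD_zero]
      rw [h0]
      refine ⟨[pvCRec zad i 0], ?_, rfl⟩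
      have hSz : Sz = [] := List.eq_nil_of_length_eq_zero hlen
      subst hSz
      have hrec : pvCRec zad i 0 + (zad.getD (i+1) []).getD 0 0 = pvCRec zad (i+1) 0 := by
        rw [pvCRec]
      rw [List.getD_eq_getElem?_getD] at hrec
      simpa [List.range_succ] using hrec
    | succ s =>
      have hsL : s + 1 < L := by omega
      simp only [List.foldl, pvInnerA, if_neg hi0]
      have hne : ¬ ((s + 1 : Nat) : Int) = 0 := by push_cast; omega
      rw [if_neg hne, hi1, hC, hzrow]
      have hj1 : ((s + 1 : Nat) : Int) - 1 = ((s : Nat) : Int) := by push_cast; ring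
      rw [hj1]
      simp only [PySem.List.pyGetD_natCast]
      have hg1 : (((List.range (s+1)).map (pvCRec zad (i+1))).getD s 0) = pvCRec zad (i+1) s :=
        pv_getD_range_map _ _ _ (by omega)
      have hg2 : (((List.range L).map (pvCRec zad i)).getD (s+1) 0) = pvCRec zad i (s+1) :=
        pv_getD_range_map _ _ _ hsL
      rw [hg1, hg2]
      set v := max (pvCRec zad (i+1) s) (pvCRec zad i (s+1)) with hv
      have hsz : (Sz ++ [v]).getD (s+1) 0 = v := by rw [← hlen]; exact pv_getD_append _ _
      rw [hsz]
      refine ⟨Sz ++ [v], ?_, by simp [hlen]⟩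
      have : v + (zad.getD (i+1) []).getD (s+1) 0 = pvCRec zad (i+1) (s+1) := by
        rw [pvCRec, hv, max_comm]
      rw [this]
      simp [List.range_succ]

-- the outer i-loop keeps the last stored row equal to pvRowVal
lemma pv_outer (r0 : List Int) (rest : List (List Int))
    (h0 : 0 < r0.length) (hch : pvChainOK (max 1 (r0.length - 1)) rest = true) :
    ∀ k, 1 ≤ k → k ≤ (r0 :: rest).length →
    ∃ S C : List (List Int),
      (PySem.List.pyRange 0 (k : Int) 1).foldl (pvOuterA (r0 :: rest))
        ([], [], [0], [PySem.List.pyGetD (PySem.List.pyGetD (r0 :: rest) 0 []) 0 0])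
      = (S, C, [], []) ∧ C.length = k ∧ C.getD (k-1) [] = pvRowVal (r0 :: rest) (k-1) := by
  intro k
  induction k with
  | zero => intro h; omega
  | succ k ih =>
    intro _ hk2
    rcases Nat.eq_zero_or_pos k with h0k | h1k
    · subst h0k
      have hr : PySem.List.pyRange 0 ((1 : Nat) : Int) 1 = [0] := by
        simpa using PySem.List.pyRange_one_singleton (0 : Int)
      rw [hr]
      simp only [List.foldl, pvOuterA]
      have hrow : PySem.List.pyGetD (r0 :: rest) (0 : Int) [] = r0 := by
        simp [PySem.List.pyGetD_zero]
      have hcast : ((r0.length : Int) - 1) = ((r0.length - 1 : Nat) : Int) := by omega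
      rw [hrow, hcast]
      obtain ⟨Sz, hfold, hlen⟩ := pv_inner0 (r0 :: rest) [] (r0.length - 1)
      rw [hrow] at hfold
      rw [hfold]
      refine ⟨[Sz], [(List.range (max 1 (r0.length - 1))).map (pvCRec (r0 :: rest) 0)],
        by simp, by simp, ?_⟩
      simp [pvRowVal, pvL]
    · obtain ⟨S, C, hfold, hClen, hClast⟩ := ih h1k (by omega)
      have hcast : ((k + 1 : Nat) : Int) = (k : Int) + 1 := by push_cast; ring
      rw [hcast, PySem.List.pyRange_one_succ_right (by positivity), List.foldl_append, hfold]
      simp only [List.foldl, pvOuterA]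
      -- facts about row k from the chain
      have hkr : k - 1 < rest.length := by simp at hk2; omega
      have hgetk : (r0 :: rest).getD k [] = rest.getD (k - 1) [] := by
        cases k with
        | zero => exact absurd h1k (lt_irrefl 0)
        | succ j => simp
      have hfacts := pv_chain_facts rest _ hch (k - 1) hkr
      have hm2 : 2 ≤ ((r0 :: rest).getD k []).length := by rw [hgetk]; exact hfacts.1
      have hbound : ((r0 :: rest).getD k []).length - 1 ≤ pvL (r0 :: rest) (k - 1) := by
        rw [hgetk]
        rcases Nat.eq_zero_or_pos (k - 1) with hz | hp
        · rw [hz] at hfacts ⊢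
          simpa [pvL] using hfacts.2
        · rcases Nat.exists_eq_add_of_le hp with ⟨j, hj⟩
          have hj' : k - 1 = j + 1 := by omega
          rw [hj'] at hfacts ⊢
          simp only [if_neg (Nat.succ_ne_zero j)] at hfacts
          have : pvL (r0 :: rest) (j + 1) = ((r0 :: rest).getD (j + 1) []).length - 1 := rfl
          rw [this]
          simpa using hfacts.2
      have hki : ((k - 1 : Nat) : Int) + 1 = (k : Int) := by omega
      have hks : k - 1 + 1 = k := by omega
      have hC : PySem.List.pyGetD C ((k - 1 : Nat) : Int) [] =
          (List.range (pvL (r0 :: rest) (k - 1))).map (pvCRec (r0 :: rest) (k - 1)) := by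
        rw [PySem.List.pyGetD_natCast]
        exact hClast
      have hinner := pv_innerS (r0 :: rest) C (k - 1) (pvL (r0 :: rest) (k - 1)) hC
        (by rw [hks]; exact hbound)
        (((r0 :: rest).getD k []).length - 1) (by rw [hks])
      rw [hki, hks] at hinner
      obtain ⟨Sz, hfold2, _⟩ := hinner
      have hrowk : PySem.List.pyGetD (r0 :: rest) (k : Int) [] = (r0 :: rest).getD k [] :=
        PySem.List.pyGetD_natCast _ _ _
      have hcast2 : (((((r0 :: rest).getD k []).length : Int)) - 1)
          = ((((r0 :: rest).getD k []).length - 1 : Nat) : Int) := by omega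
      rw [hrowk, hcast2]
      rw [hrowk] at hfold2
      rw [hfold2]
      refine ⟨S ++ [Sz],
        C ++ [(List.range (((r0 :: rest).getD k []).length - 1)).map (pvCRec (r0 :: rest) k)],
        rfl, by simp [hClen], ?_⟩
      have hlast : (C ++ [(List.range (((r0 :: rest).getD k []).length - 1)).map (pvCRec (r0 :: rest) k)]).getD k []
          = (List.range (((r0 :: rest).getD k []).length - 1)).map (pvCRec (r0 :: rest) k) := by
        rw [← hClen]; exact pv_getD_append_lists _ _
      simp only [Nat.add_sub_cancel, hlast]
      have hLk : pvL (r0 :: rest) k = ((r0 :: rest).getD k []).length - 1 := by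
        rw [← hks]; rfl
      rw [pvRowVal, hLk]

lemma pv_getLast_getD {α : Type} (l : List α) (d : α) (h : 1 ≤ l.length) :
    l.getLast? = some (l.getD (l.length - 1) d) := by
  rw [List.getLast?_eq_getElem?, List.getElem?_eq_getElem (by omega), List.getD_eq_getElem?_getD,
    List.getElem?_eq_getElem (by omega)]
  rfl

lemma pv_getLast_range_map (f : Nat → Int) (L : Nat) (h : 1 ≤ L) :
    ((List.range L).map f).getLast? = some (f (L - 1)) := by
  rw [List.getLast?_eq_getElem?]
  simp only [List.length_map, List.length_range]
  rw [List.getElem?_eq_getElem (by simpa using Nat.sub_lt (by omega) one_pos)]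
  simp [List.getElem_map]

lemma pv_calc_eq (zad : List (List Int)) (h : pvValidZad zad = true) :
    pvCalcA zad = pvCalcB zad := by
  cases zad with
  | nil => rfl
  | cons r0 rest =>
    simp only [pvValidZad, Bool.and_eq_true, decide_eq_true_eq] at h
    obtain ⟨h0, hch⟩ := h
    have hn : 1 ≤ (r0 :: rest).length := by simp
    obtain ⟨S, C, hfold, hClen, hClast⟩ :=
      pv_outer r0 rest h0 hch (r0 :: rest).length hn le_rfl
    unfold pvCalcA pvCalcB
    rw [if_neg (by simp), if_neg (by simp)]
    rw [hfold]
    have hCne : 1 ≤ C.length := by omega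
    rw [PySem.List.pyGet?_neg_one, pv_getLast_getD C [] hCne]
    simp only [Option.bind_some, hClen, hClast]
    -- the last stored row has pvL ≥ 1 entries
    have hlast : (r0 :: rest).getLast?.getD [] = (r0 :: rest).getD ((r0 :: rest).length - 1) [] := by
      rw [pv_getLast_getD (r0 :: rest) [] hn]
      rfl
    set n := (r0 :: rest).length with hnn
    have hL1 : 1 ≤ pvL (r0 :: rest) (n - 1) ∧
        (2 ≤ ((r0 :: rest).getD (n - 1) []).length →
          pvL (r0 :: rest) (n - 1) = ((r0 :: rest).getD (n - 1) []).length - 1) ∧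
        (n - 1 ≠ 0 → 2 ≤ ((r0 :: rest).getD (n - 1) []).length) := by
      rcases Nat.eq_zero_or_pos (n - 1) with hz | hp
      · refine ⟨?_, ?_, by omega⟩
        · rw [hz]; simp [pvL]
        · rw [hz]; intro h2; simp only [pvL]
          simp only [List.getD_cons_zero] at h2 ⊢
          omega
      · rcases Nat.exists_eq_add_of_le hp with ⟨j, hj⟩
        have hj' : n - 1 = j + 1 := by omega
        have hjr : j < rest.length := by simp [hnn] at hj' ⊢; omega
        have hfacts := (pv_chain_facts rest _ hch j hjr).1
        have hget : (r0 :: rest).getD (j + 1) [] = rest.getD j [] := by simp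
        rw [hj']
        refine ⟨?_, fun _ => rfl, fun _ => by rw [hget]; exact hfacts⟩
        have : pvL (r0 :: rest) (j + 1) = ((r0 :: rest).getD (j + 1) []).length - 1 := rfl
        rw [this, hget]
        omega
    obtain ⟨hL1', hLeq, hge2⟩ := hL1
    rw [pvRowVal, PySem.List.pyGet?_neg_one, pv_getLast_range_map _ _ hL1']
    rw [hlast]
    congr 2
    -- target column: if 2 ≤ m then m - 2 else 0  =  pvL - 1
    rcases Nat.eq_zero_or_pos (n - 1) with hz | hp
    · rw [hz] at hLeq ⊢
      have hm0 : 0 < ((r0 :: rest).getD 0 []).length := by simpa using h0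
      split_ifs with h2
      · rw [hLeq h2]; omega
      · simp only [pvL]
        simp only [List.getD_cons_zero] at h2 ⊢
        omega
    · have h2 := hge2 (by omega)
      rw [if_pos h2, hLeq h2]
      omega



-- ===== VERDICT (by name: the statement is the Claim_ definition above) =====
theorem znajdzNajlepszegoOsobnika_spec : Claim_equal_znajdzNajlepszegoOsobnika := by
  intro wyspy _ hpre
  unfold Spec_znajdzNajlepszegoOsobnika znajdzNajlepszegoOsobnika znajdzNajlepszegoOsobnika_alt
  congr 1
  apply PySem.List.foldl_congr_mem
  intro acc w hw
  apply PySem.List.foldl_congr_mem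
  intro acc2 o ho
  rw [pv_calc_eq o (hpre w hw o ho)]
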